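-- pv_equiv track=rewrite | github.com/kingbaudouinfoundation/CompaniesData | functions.py | get_datas_employees
-- ===== SOURCE A (Python) =====
-- def get_datas_employees(tab):
--
--     P1 = P2 = P3 = P4 = P5 = P6 = P7 = P8 = 0
--     list_emp = []
--     prop_empl = []
--     for row in tab:
--         x = row.split(' to ')
--         if len(x) > 1:
--             diff = int(x[1]) - int(x[0])
--             if diff <= 5:
--                 P1 = P1 + 1
--                 list_emp.append('1 to 5')
--             elif diff >= 5 and diff <= 10:
--                 P2 = P2 + 1
--                 list_emp.append('5 to 10')
--             elif diff >= 10 and diff <= 20: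
--                 P3 = P3 + 1
--                 list_emp.append('10 to 20')
--             elif diff >= 20 and diff <= 50:
--                 P4 = P4 + 1
--                 list_emp.append('20 to 50')
--             elif diff >= 50 and diff <= 100:
--                 P5 = P5 + 1
--                 list_emp.append('50 to 100')
--             elif diff>= 100 and diff <= 500:
--                 P6 = P6 + 1
--                 list_emp.append('100 to 500')
--             elif diff >= 500 and diff <= 1000:
--                 P7 = P7 + 1
--                 list_emp.append('500 to 1000')
--         elif tab is not None:
--             P8 = P8 + 1
--             list_emp.append('More than 1000')
--
--     prop_empl.append(P1)
--     prop_empl.append(P2)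
--     prop_empl.append(P3)
--     prop_empl.append(P4)
--     prop_empl.append(P5)
--     prop_empl.append(P6)
--     prop_empl.append(P7)
--     prop_empl.append(P8)
--
--     return prop_empl, list_emp
-- ===== SOURCE B (Python) =====
-- LABELS = ['1 to 5', '5 to 10', '10 to 20', '20 to 50', '50 to 100',
--           '100 to 500', '500 to 1000', 'More than 1000']
-- UPPERS = [5, 10, 20, 50, 100, 500, 1000]
--
--
-- def classify(row):
--     parts = row.split(' to ')
--     if len(parts) < 2:
--         return 'More than 1000'
--     diff = int(parts[1]) - int(parts[0])
--     if diff > 1000: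
--         return None
--     return LABELS[sum(diff > u for u in UPPERS)]
--
--
-- def get_datas_employees(tab):
--     labels = [lbl for lbl in map(classify, tab) if lbl is not None]
--     return [labels.count(lbl) for lbl in LABELS], labels
-- ===== Notes on version B (the rewrite author's own statement) =====
-- stated objective: alternative
-- what changed: Two staged passes replace A's single fold over eight running counters: each row is first mapped to its label by rank arithmetic (the bucket index is the number of exceeded thresholds, no branch chain), then the eight counts are recovered afterwards by counting each label in the label list.
import Mathlib
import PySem

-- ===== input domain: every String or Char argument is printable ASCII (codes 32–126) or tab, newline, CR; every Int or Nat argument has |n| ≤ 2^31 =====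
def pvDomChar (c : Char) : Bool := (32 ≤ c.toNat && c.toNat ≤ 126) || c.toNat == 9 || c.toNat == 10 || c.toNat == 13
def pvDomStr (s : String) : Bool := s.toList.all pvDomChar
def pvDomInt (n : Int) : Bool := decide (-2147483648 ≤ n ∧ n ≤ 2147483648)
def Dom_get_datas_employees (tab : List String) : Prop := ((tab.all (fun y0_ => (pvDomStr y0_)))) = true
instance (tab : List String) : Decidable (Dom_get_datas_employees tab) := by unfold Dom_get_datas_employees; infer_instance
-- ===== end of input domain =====

-- B stages the work in two passes (map each row to its label by rank arithmetic, then recover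
-- the eight counts by counting labels afterwards) instead of A's single fold over eight counters.

-- ===== PORT A =====
-- A's loop state: the eight counters P1..P8 and list_emp.
def pvStepA (st : (Int × Int × Int × Int × Int × Int × Int × Int) × List String) (row : String) :
    (Int × Int × Int × Int × Int × Int × Int × Int) × List String :=
  let ((P1, P2, P3, P4, P5, P6, P7, P8), l) := st
  let x := (PySem.Str.split? row " to ").getD []
  if 1 < x.length then
    -- Pre_ excludes rows where int() raises; there .getD 0 is never the claimed value
    let diff := (PySem.Int.ofStr? (x.getD 1 "")).getD 0 - (PySem.Int.ofStr? (x.getD 0 "")).getD 0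
    if diff ≤ 5 then ((P1 + 1, P2, P3, P4, P5, P6, P7, P8), l ++ ["1 to 5"])
    else if 5 ≤ diff ∧ diff ≤ 10 then ((P1, P2 + 1, P3, P4, P5, P6, P7, P8), l ++ ["5 to 10"])
    else if 10 ≤ diff ∧ diff ≤ 20 then ((P1, P2, P3 + 1, P4, P5, P6, P7, P8), l ++ ["10 to 20"])
    else if 20 ≤ diff ∧ diff ≤ 50 then ((P1, P2, P3, P4 + 1, P5, P6, P7, P8), l ++ ["20 to 50"])
    else if 50 ≤ diff ∧ diff ≤ 100 then ((P1, P2, P3, P4, P5 + 1, P6, P7, P8), l ++ ["50 to 100"])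
    else if 100 ≤ diff ∧ diff ≤ 500 then ((P1, P2, P3, P4, P5, P6 + 1, P7, P8), l ++ ["100 to 500"])
    else if 500 ≤ diff ∧ diff ≤ 1000 then ((P1, P2, P3, P4, P5, P6, P7 + 1, P8), l ++ ["500 to 1000"])
    else ((P1, P2, P3, P4, P5, P6, P7, P8), l)
  else -- 'elif tab is not None': tab is a list here, always true
    ((P1, P2, P3, P4, P5, P6, P7, P8 + 1), l ++ ["More than 1000"])

def get_datas_employees (tab : List String) : List Int × List String :=
  let r := tab.foldl pvStepA ((0, 0, 0, 0, 0, 0, 0, 0), [])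
  ([r.1.1, r.1.2.1, r.1.2.2.1, r.1.2.2.2.1, r.1.2.2.2.2.1, r.1.2.2.2.2.2.1,
    r.1.2.2.2.2.2.2.1, r.1.2.2.2.2.2.2.2], r.2)

-- ===== PORT B =====
def pvLabels : List String :=
  ["1 to 5", "5 to 10", "10 to 20", "20 to 50", "50 to 100", "100 to 500",
   "500 to 1000", "More than 1000"]

def pvUppers : List Int := [5, 10, 20, 50, 100, 500, 1000]

-- classify(row): label by rank arithmetic — LABELS[sum(diff > u for u in UPPERS)]
def pvClassify (row : String) : Option String :=
  let parts := (PySem.Str.split? row " to ").getD []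
  if parts.length < 2 then some "More than 1000"
  else
    let diff := (PySem.Int.ofStr? (parts.getD 1 "")).getD 0 - (PySem.Int.ofStr? (parts.getD 0 "")).getD 0
    if 1000 < diff then none
    else some (pvLabels.getD ((pvUppers.map (fun u => if u < diff then (1 : Nat) else 0)).sum) "")

def get_datas_employees_alt (tab : List String) : List Int × List String :=
  let labels := tab.filterMap pvClassify
  (pvLabels.map (fun lbl => (labels.count lbl : Int)), labels)

-- ===== PRECONDITION & SPEC =====
-- Pre_ excludes exactly the rows on which A raises ValueError: a row that splits on
-- ' to ' into more than one part whose first or second part is not int()-parseable.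
def pvRowOk (row : String) : Bool :=
  let x := (PySem.Str.split? row " to ").getD []
  x.length ≤ 1 || ((PySem.Int.ofStr? (x.getD 0 "")).isSome && (PySem.Int.ofStr? (x.getD 1 "")).isSome)

def Pre_get_datas_employees (tab : List String) : Prop := tab.all pvRowOk = true
instance (tab : List String) : Decidable (Pre_get_datas_employees tab) := by
  unfold Pre_get_datas_employees; infer_instance

def pvWitness_get_datas_employees : List String :=
  ["1 to 3", "hello", "7 to 20", "0 to 2000", "10 to 60"]

def Spec_get_datas_employees (tab : List String) (out : List Int × List String) : Prop :=
  out = get_datas_employees_alt tab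
instance (tab : List String) (out : List Int × List String) : Decidable (Spec_get_datas_employees tab out) := by
  unfold Spec_get_datas_employees; infer_instance

-- ===== CLAIM (what is proved, stated in full; the proofs are below) =====
def Claim_equal_get_datas_employees : Prop := ∀ (tab : List String), Dom_get_datas_employees tab → Pre_get_datas_employees tab → Spec_get_datas_employees tab (get_datas_employees tab)

-- ===== LEMMAS AND PROOFS =====
-- the eight counters of A, expressed as label counts of the list built so far
def pvCounts (l : List String) : Int × Int × Int × Int × Int × Int × Int × Int :=
  ((l.count "1 to 5" : Int), (l.count "5 to 10" : Int), (l.count "10 to 20" : Int),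
   (l.count "20 to 50" : Int), (l.count "50 to 100" : Int), (l.count "100 to 500" : Int),
   (l.count "500 to 1000" : Int), (l.count "More than 1000" : Int))

-- the rank-arithmetic index picks the same label as A's elif chain
lemma pvRank_eval (diff : Int) (h : diff ≤ 1000) :
    pvLabels.getD ((pvUppers.map (fun u => if u < diff then (1 : Nat) else 0)).sum) "" =
      if diff ≤ 5 then "1 to 5"
      else if diff ≤ 10 then "5 to 10"
      else if diff ≤ 20 then "10 to 20"
      else if diff ≤ 50 then "20 to 50"
      else if diff ≤ 100 then "50 to 100"
      else if diff ≤ 500 then "100 to 500"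
      else "500 to 1000" := by
  simp only [pvUppers, pvLabels, List.map, List.sum_cons, List.sum_nil]
  by_cases h5 : diff ≤ 5
  · simp [h5, show ¬((5:Int) < diff) from by omega, show ¬((10:Int) < diff) from by omega,
      show ¬((20:Int) < diff) from by omega, show ¬((50:Int) < diff) from by omega,
      show ¬((100:Int) < diff) from by omega, show ¬((500:Int) < diff) from by omega,
      show ¬((1000:Int) < diff) from by omega]
  · by_cases h10 : diff ≤ 10
    · simp [h5, h10, show (5:Int) < diff from by omega, show ¬((10:Int) < diff) from by omega,
        show ¬((20:Int) < diff) from by omega, show ¬((50:Int) < diff) from by omega,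
        show ¬((100:Int) < diff) from by omega, show ¬((500:Int) < diff) from by omega,
        show ¬((1000:Int) < diff) from by omega]
    · by_cases h20 : diff ≤ 20
      · simp [h5, h10, h20, show (5:Int) < diff from by omega, show (10:Int) < diff from by omega,
          show ¬((20:Int) < diff) from by omega, show ¬((50:Int) < diff) from by omega,
          show ¬((100:Int) < diff) from by omega, show ¬((500:Int) < diff) from by omega,
          show ¬((1000:Int) < diff) from by omega]
      · by_cases h50 : diff ≤ 50
        · simp [h5, h10, h20, h50, show (5:Int) < diff from by omega,
            show (10:Int) < diff from by omega, show (20:Int) < diff from by omega,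
            show ¬((50:Int) < diff) from by omega, show ¬((100:Int) < diff) from by omega,
            show ¬((500:Int) < diff) from by omega, show ¬((1000:Int) < diff) from by omega]
        · by_cases h100 : diff ≤ 100
          · simp [h5, h10, h20, h50, h100, show (5:Int) < diff from by omega,
              show (10:Int) < diff from by omega, show (20:Int) < diff from by omega,
              show (50:Int) < diff from by omega, show ¬((100:Int) < diff) from by omega,
              show ¬((500:Int) < diff) from by omega, show ¬((1000:Int) < diff) from by omega]
          · by_cases h500 : diff ≤ 500
            · simp [h5, h10, h20, h50, h100, h500, show (5:Int) < diff from by omega,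
                show (10:Int) < diff from by omega, show (20:Int) < diff from by omega,
                show (50:Int) < diff from by omega, show (100:Int) < diff from by omega,
                show ¬((500:Int) < diff) from by omega, show ¬((1000:Int) < diff) from by omega]
            · simp [h5, h10, h20, h50, h100, h500, show (5:Int) < diff from by omega,
                show (10:Int) < diff from by omega, show (20:Int) < diff from by omega,
                show (50:Int) < diff from by omega, show (100:Int) < diff from by omega,
                show (500:Int) < diff from by omega, show ¬((1000:Int) < diff) from by omega]

set_option maxHeartbeats 1000000 in
lemma pvStepA_counts (l : List String) (row : String) :
    pvStepA (pvCounts l, l) row =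
      (pvCounts (l ++ (pvClassify row).toList), l ++ (pvClassify row).toList) := by
  simp only [pvStepA, pvClassify]
  by_cases hlen : 1 < ((PySem.Str.split? row " to ").getD []).length
  · simp only [if_pos hlen, if_neg (by omega : ¬ ((PySem.Str.split? row " to ").getD []).length < 2)]
    set diff := (PySem.Int.ofStr? (((PySem.Str.split? row " to ").getD []).getD 1 "")).getD 0 -
        (PySem.Int.ofStr? (((PySem.Str.split? row " to ").getD []).getD 0 "")).getD 0 with hdiff
    by_cases hbig : 1000 < diff
    · simp only [if_pos hbig, Option.toList_none, List.append_nil]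
      rw [if_neg (by omega), if_neg (by omega), if_neg (by omega), if_neg (by omega),
          if_neg (by omega), if_neg (by omega), if_neg (by omega)]
    · simp only [if_neg hbig, Option.toList_some]
      rw [pvRank_eval diff (by omega)]
      split_ifs <;> simp [pvCounts, List.count_append] <;> omega
  · simp only [if_neg hlen, if_pos (by omega : ((PySem.Str.split? row " to ").getD []).length < 2),
      Option.toList_some]
    simp [pvCounts, List.count_append]

lemma pvFoldA_counts (tab : List String) (l : List String) :
    tab.foldl pvStepA (pvCounts l, l) =
      (pvCounts (l ++ tab.filterMap pvClassify), l ++ tab.filterMap pvClassify) := by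
  induction tab generalizing l with
  | nil => simp
  | cons r rest ih =>
      rw [List.foldl_cons, pvStepA_counts]
      cases h : pvClassify r <;> simp [h, ih]

-- ===== VERDICT (by name: the statement is the Claim_ definition above) =====
theorem get_datas_employees_spec : Claim_equal_get_datas_employees := by
  intro tab _ _
  unfold Spec_get_datas_employees get_datas_employees get_datas_employees_alt
  have h0 : ((0, 0, 0, 0, 0, 0, 0, 0) : Int × Int × Int × Int × Int × Int × Int × Int)
      = pvCounts [] := rfl
  simp only [h0]
  rw [pvFoldA_counts]
  simp [pvCounts, pvLabels]
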